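-- pv_equiv track=rewrite | github.com/moemode/algs | mit-6006/problem_sets/ps7/7_1_effective_campaigning.py | max_votes
-- ===== SOURCE A (Python) =====
-- def max_votes(n, d, z):
--     maxv = [0] * n
--     maxv[n - 1] = d[n - 1]
--     for i in range(n - 2, -1, -1):
--         campaign_i = d[i] + sum(z[i + 1 : i + 3]) + maxv[i + 3] if i + 3 < n else 0
--         no_campaign_i = z[i] + maxv[i + 1]
--         maxv[i] = max(campaign_i, no_campaign_i)
--     return maxv[0]
-- ===== SOURCE B (Python) =====
-- def max_votes(n, d, z):
--     # Top-down memoized recursion on the recurrence (vs A's bottom-up array DP).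
--     # rec(i) computes the best suffix value on demand, caching in a dict seeded
--     # with the base value d[n-1]; the driver loop only warms the cache so rec
--     # never nests beyond CPython's recursion limit.
--     memo = {n - 1: d[n - 1]}
--
--     def rec(i):
--         if i in memo:
--             return memo[i]
--         no_campaign = z[i] + rec(i + 1)
--         campaign = d[i] + sum(z[i + 1 : i + 3]) + rec(i + 3) if i + 3 < n else 0
--         memo[i] = max(campaign, no_campaign)
--         return memo[i]
--
--     for i in range(n - 1, -1, -1):
--         rec(i)
--     return rec(0)
-- ===== Notes on version B (the rewrite author's own statement) =====
-- stated objective: alternative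
-- what changed: A's bottom-up array DP (explicit maxv list filled by a reverse index loop) is replaced by top-down memoized recursion: rec(i) computes the recurrence on demand, caching results in a dict seeded with the base value d[n-1]; a cache-warming driver keeps the recursion shallow.
import Mathlib
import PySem

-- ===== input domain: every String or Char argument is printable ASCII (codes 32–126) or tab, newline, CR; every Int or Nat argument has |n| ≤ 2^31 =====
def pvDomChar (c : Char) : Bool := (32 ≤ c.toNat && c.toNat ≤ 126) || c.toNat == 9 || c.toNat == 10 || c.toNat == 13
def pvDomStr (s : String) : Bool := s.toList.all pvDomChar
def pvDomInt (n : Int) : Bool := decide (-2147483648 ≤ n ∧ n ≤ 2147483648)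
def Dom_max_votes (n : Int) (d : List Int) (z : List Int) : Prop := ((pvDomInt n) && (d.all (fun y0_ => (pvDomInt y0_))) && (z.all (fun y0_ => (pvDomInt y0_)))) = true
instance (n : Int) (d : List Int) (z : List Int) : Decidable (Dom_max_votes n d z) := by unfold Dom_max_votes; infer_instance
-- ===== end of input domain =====

-- B replaces A's bottom-up maxv-array DP by top-down memoized recursion on the same recurrence (different decomposition, same cost).


-- ===== PORT A =====
-- literal transliteration of A: full maxv array, backward index loop, slice+sum for z[i+1:i+3]
def max_votes (n : Int) (d : List Int) (z : List Int) : Int :=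
  let maxv : List Int := List.replicate n.toNat 0
  let maxv := maxv.set (n - 1).toNat (PySem.List.pyGetD d (n - 1) 0)
  let maxv := (PySem.List.pyRange (n - 2) (-1) (-1)).foldl
    (fun maxv i =>
      let campaign_i : Int :=
        if i + 3 < n then
          PySem.List.pyGetD d i 0 + (PySem.List.slice z (some (i + 1)) (some (i + 3))).sum
            + PySem.List.pyGetD maxv (i + 3) 0
        else 0
      let no_campaign_i := PySem.List.pyGetD z i 0 + PySem.List.pyGetD maxv (i + 1) 0
      maxv.set i.toNat (max campaign_i no_campaign_i)) maxv
  PySem.List.pyGetD maxv 0 0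

-- ===== PORT B =====
-- literal transliteration of B: rec(i), memoized in a dict seeded with {n-1: d[n-1]}.
-- Python's rec(i) recurses on the index i; the port carries the same index as i = n - 1 - k,
-- and the cache-warming driver loop is the foldl threading the memo through rec at each i.
-- with the Nat k = n - 1 - i as the structurally decreasing depth (fuel) of the same calls
-- rec(i+1) ↦ k-1 and rec(i+3) ↦ k-3.  At k = 0 (i = n-1) the key is seeded in the memo in
-- Python; the none-branch there returns the same seeded base value d[n-1].
def bRec (n : Int) (d z : List Int) : Nat → PySem.Dict Int Int → Int × PySem.Dict Int Int
  | k, memo =>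
    let i : Int := n - 1 - (k : Int)
    match PySem.Dict.get? memo i with
    | some v => (v, memo)
    | none =>
      match k with
      | 0 => (PySem.List.pyGetD d (n - 1) 0, memo)
      | m + 1 =>
        let p1 := bRec n d z m memo
        let no_campaign := PySem.List.pyGetD z i 0 + p1.1
        let p3 :=
          if i + 3 < n then
            let q := bRec n d z (m - 2) p1.2
            (PySem.List.pyGetD d i 0
              + (PySem.List.slice z (some (i + 1)) (some (i + 3))).sum + q.1, q.2)
          else (0, p1.2)
        let v := max p3.1 no_campaign
        (v, p3.2.insert i v)
  termination_by k _ => k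
  decreasing_by all_goals omega

def max_votes_alt (n : Int) (d : List Int) (z : List Int) : Int :=
  let memo : PySem.Dict Int Int :=
    (PySem.Dict.empty).insert (n - 1) (PySem.List.pyGetD d (n - 1) 0)
  let memo := (PySem.List.pyRange (n - 1) (-1) (-1)).foldl
    (fun memo i => (bRec n d z (n - 1 - i).toNat memo).2) memo
  (bRec n d z (n - 1).toNat memo).1

-- ===== PRECONDITION & SPEC =====
-- Pre_ is exactly where the Python A returns: n ≥ 1 (maxv[n-1] raises IndexError for n ≤ 0),
-- d long enough for d[n-1], and z long enough for z[i], i ≤ n-2.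
def Pre_max_votes (n : Int) (d : List Int) (z : List Int) : Prop :=
  1 ≤ n ∧ n ≤ (d.length : Int) ∧ n - 1 ≤ (z.length : Int)
instance (n : Int) (d : List Int) (z : List Int) : Decidable (Pre_max_votes n d z) := by unfold Pre_max_votes; infer_instance
def pvWitness_max_votes : Int × List Int × List Int := (4, [3, 1, 2, 5], [1, 4, 1, 1])

def Spec_max_votes (n : Int) (d : List Int) (z : List Int) (out : Int) : Prop := out = max_votes_alt n d z
instance (n : Int) (d : List Int) (z : List Int) (out : Int) : Decidable (Spec_max_votes n d z out) := by unfold Spec_max_votes; infer_instance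

-- ===== CLAIM (what is proved, stated in full; the proofs are below) =====
def Claim_equal_max_votes : Prop := ∀ (n : Int) (d : List Int) (z : List Int), Dom_max_votes n d z → Pre_max_votes n d z → Spec_max_votes n d z (max_votes n d z)

-- ===== LEMMAS AND PROOFS =====

-- the pure value of the shared recurrence at depth k (index i = n-1-k)
def mvSpec (n : Int) (d z : List Int) : Nat → Int
  | 0 => PySem.List.pyGetD d (n - 1) 0
  | m + 1 =>
    let i : Int := n - 2 - (m : Int)
    max
      (if i + 3 < n then
        PySem.List.pyGetD d i 0 + (PySem.List.slice z (some (i + 1)) (some (i + 3))).sum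
          + mvSpec n d z (m - 2)
       else 0)
      (PySem.List.pyGetD z i 0 + mvSpec n d z m)
  termination_by k => k
  decreasing_by all_goals omega

-- memo invariant: every cached value at a key n-1-j is the recurrence value at depth j
def MemoOK (n : Int) (d z : List Int) (memo : PySem.Dict Int Int) : Prop :=
  ∀ (j : Nat) (v : Int), memo.get? (n - 1 - (j : Int)) = some v → v = mvSpec n d z j

theorem memoOK_insert (n : Int) (d z : List Int) (memo : PySem.Dict Int Int)
    (k : Nat) (hm : MemoOK n d z memo) :
    MemoOK n d z (memo.insert (n - 1 - (k : Int)) (mvSpec n d z k)) := by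
  intro j v hv
  rw [PySem.Dict.get?_insert] at hv
  split_ifs at hv with h
  · have : j = k := by omega
    cases hv; rw [this]
  · exact hm j v hv

theorem bRec_correct (n : Int) (d z : List Int) :
    ∀ (k : Nat) (memo : PySem.Dict Int Int), MemoOK n d z memo →
      (bRec n d z k memo).1 = mvSpec n d z k ∧ MemoOK n d z (bRec n d z k memo).2 := by
  intro k
  induction k using Nat.strong_induction_on with
  | _ k ih =>
    intro memo hm
    rw [bRec.eq_def]
    cases hget : PySem.Dict.get? memo (n - 1 - (k : Int)) with
    | some v =>
      simp only [hget]
      exact ⟨hm k v hget, hm⟩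
    | none =>
      simp only [hget]
      cases k with
      | zero => exact ⟨by simp [mvSpec], hm⟩
      | succ m =>
        obtain ⟨h1v, h1m⟩ := ih m (by omega) memo hm
        have hi : n - 1 - ((m + 1 : Nat) : Int) = n - 2 - (m : Int) := by push_cast; ring
        by_cases hc : n - 1 - ((m + 1 : Nat) : Int) + 3 < n
        · obtain ⟨h3v, h3m⟩ := ih (m - 2) (by omega) _ h1m
          have hc' : n - 2 - (m : Int) + 3 < n := by rw [← hi]; exact hc
          have hmv : mvSpec n d z (m + 1)
              = max (PySem.List.pyGetD d (n - 1 - ((m + 1 : Nat) : Int)) 0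
                  + (PySem.List.slice z (some (n - 1 - ((m + 1 : Nat) : Int) + 1))
                      (some (n - 1 - ((m + 1 : Nat) : Int) + 3))).sum
                  + mvSpec n d z (m - 2))
                (PySem.List.pyGetD z (n - 1 - ((m + 1 : Nat) : Int)) 0 + mvSpec n d z m) := by
            rw [mvSpec, hi]
            rw [if_pos hc']
          refine ⟨?_, ?_⟩
          · simp only [if_pos hc, h1v, h3v, hmv]
          · simp only [if_pos hc]
            have hveq : max (PySem.List.pyGetD d (n - 1 - ((m + 1 : Nat) : Int)) 0
                  + (PySem.List.slice z (some (n - 1 - ((m + 1 : Nat) : Int) + 1))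
                      (some (n - 1 - ((m + 1 : Nat) : Int) + 3))).sum
                  + (bRec n d z (m - 2) (bRec n d z m memo).2).1)
                (PySem.List.pyGetD z (n - 1 - ((m + 1 : Nat) : Int)) 0 + (bRec n d z m memo).1)
                  = mvSpec n d z (m + 1) := by
              rw [h1v, h3v, hmv]
            rw [hveq]
            exact memoOK_insert n d z _ (m + 1) h3m
        · have hc' : ¬ (n - 2 - (m : Int) + 3 < n) := by rw [← hi]; exact hc
          have hmv : mvSpec n d z (m + 1)
              = max (0 : Int)
                (PySem.List.pyGetD z (n - 1 - ((m + 1 : Nat) : Int)) 0 + mvSpec n d z m) := by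
            rw [mvSpec, hi]
            rw [if_neg hc']
          refine ⟨?_, ?_⟩
          · simp only [if_neg hc, h1v, hmv]
          · simp only [if_neg hc]
            have hveq : max (0 : Int)
                (PySem.List.pyGetD z (n - 1 - ((m + 1 : Nat) : Int)) 0 + (bRec n d z m memo).1)
                  = mvSpec n d z (m + 1) := by
              rw [h1v, hmv]
            rw [hveq]
            exact memoOK_insert n d z _ (m + 1) h1m

-- the warming driver preserves the memo invariant
theorem memoOK_fold (n : Int) (d z : List Int) (l : List Int) :
    ∀ (memo : PySem.Dict Int Int), MemoOK n d z memo →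
      MemoOK n d z (l.foldl (fun memo i => (bRec n d z (n - 1 - i).toNat memo).2) memo) := by
  induction l with
  | nil => intro memo hm; exact hm
  | cons x xs ih =>
    intro memo hm
    exact ih _ (bRec_correct n d z (n - 1 - x).toNat memo hm).2

-- A-side helpers (from the fold)
def stepA (n : Int) (d z : List Int) (maxv : List Int) (i : Int) : List Int :=
  let campaign_i : Int :=
    if i + 3 < n then
      PySem.List.pyGetD d i 0 + (PySem.List.slice z (some (i + 1)) (some (i + 3))).sum
        + PySem.List.pyGetD maxv (i + 3) 0
    else 0
  let no_campaign_i := PySem.List.pyGetD z i 0 + PySem.List.pyGetD maxv (i + 1) 0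
  maxv.set i.toNat (max campaign_i no_campaign_i)

theorem max_votes_eq (n : Int) (d z : List Int) :
    max_votes n d z
      = PySem.List.pyGetD
          ((PySem.List.pyRange (n - 2) (-1) (-1)).foldl (stepA n d z)
            ((List.replicate n.toNat 0).set (n - 1).toNat (PySem.List.pyGetD d (n - 1) 0))) 0 0 := rfl

theorem pyGetD_of_ge (xs : List Int) (i : Int) (h : (xs.length : Int) ≤ i) :
    PySem.List.pyGetD xs i 0 = 0 := by
  have h0 : 0 ≤ i := le_trans (by positivity) h
  simp [PySem.List.pyGetD, PySem.List.pyGet?, PySem.List.pyIdx?, h0,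
    show ¬ i < (xs.length : Int) by omega]

theorem pyGetD_set_self (xs : List Int) (k : Nat) (v : Int) (hk : k < xs.length) :
    PySem.List.pyGetD (xs.set k v) (k : Int) 0 = v := by
  rw [PySem.List.pyGetD_eq_getElem _ _ (by omega) (by simp; omega)]
  simp

theorem pyGetD_set_self' (xs : List Int) (i : Int) (v : Int) (h0 : 0 ≤ i) (hk : i.toNat < xs.length) :
    PySem.List.pyGetD (xs.set i.toNat v) i 0 = v := by
  have h := pyGetD_set_self xs i.toNat v hk
  rwa [Int.toNat_of_nonneg h0] at h

theorem pyGetD_set_ne (xs : List Int) (k : Nat) (v : Int) (i : Int)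
    (h0 : 0 ≤ i) (h : i.toNat ≠ k) :
    PySem.List.pyGetD (xs.set k v) i 0 = PySem.List.pyGetD xs i 0 := by
  by_cases hi : i < (xs.length : Int)
  · rw [PySem.List.pyGetD_eq_getElem _ _ h0 (by simp; omega),
        PySem.List.pyGetD_eq_getElem _ _ h0 hi]
    rw [List.getElem_set_ne (by omega)]
  · rw [pyGetD_of_ge (xs.set k v) i (by rw [List.length_set]; omega),
        pyGetD_of_ge xs i (by omega)]

-- invariant of A's fold: after processing m indices (n-2 down to n-1-m), every cell
-- j ∈ [n-1-m, n-1] holds the recurrence value at depth n-1-j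
theorem foldA_inv (n : Int) (d z : List Int) (hn : 1 ≤ n) :
    ∀ (m : Nat), (m : Int) ≤ n - 1 →
      (let M := ((List.range m).map (fun k : Nat => n - 2 - (k : Int))).foldl (stepA n d z)
        ((List.replicate n.toNat 0).set (n - 1).toNat (PySem.List.pyGetD d (n - 1) 0));
       (M.length : Int) = n ∧
       ∀ (j : Int), n - 1 - (m : Int) ≤ j → j ≤ n - 1 →
         PySem.List.pyGetD M j 0 = mvSpec n d z (n - 1 - j).toNat) := by
  intro m
  induction m with
  | zero =>
    intro _
    constructor
    · simp; omega
    · intro j hj1 hj2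
      have hj : j = n - 1 := by omega
      simp only [List.range_zero, List.map_nil, List.foldl_nil]
      rw [hj, pyGetD_set_self' _ _ _ (by omega) (by simp; omega),
        show ((n : Int) - 1 - (n - 1)).toNat = 0 from by omega, mvSpec]
  | succ m ih =>
    intro hm
    obtain ⟨hlen, hinv⟩ := ih (by omega)
    set M := ((List.range m).map (fun k : Nat => n - 2 - (k : Int))).foldl (stepA n d z)
      ((List.replicate n.toNat 0).set (n - 1).toNat (PySem.List.pyGetD d (n - 1) 0)) with hM
    have hlist : (List.range (m + 1)).map (fun k : Nat => n - 2 - (k : Int))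
        = ((List.range m).map (fun k : Nat => n - 2 - (k : Int))) ++ [n - 2 - (m : Int)] := by
      rw [List.range_succ, List.map_append]; rfl
    rw [hlist, List.foldl_append, ← hM, List.foldl_cons, List.foldl_nil]
    set i : Int := n - 2 - (m : Int) with hidef
    have hi0 : 0 ≤ i := by omega
    have hiL : i.toNat < M.length := by omega
    -- the freshly written cell value equals mvSpec (m+1)
    have hcamp : (if i + 3 < n then
        PySem.List.pyGetD d i 0 + (PySem.List.slice z (some (i + 1)) (some (i + 3))).sum
          + PySem.List.pyGetD M (i + 3) 0
      else 0) = (if i + 3 < n then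
        PySem.List.pyGetD d i 0 + (PySem.List.slice z (some (i + 1)) (some (i + 3))).sum
          + mvSpec n d z (m - 2)
      else 0) := by
      split_ifs with hlt
      · have h3 := hinv (i + 3) (by omega) (by omega)
        rw [h3, show ((n : Int) - 1 - (i + 3)).toNat = m - 2 from by omega]
      · rfl
    have hnoc : PySem.List.pyGetD z i 0 + PySem.List.pyGetD M (i + 1) 0
        = PySem.List.pyGetD z i 0 + mvSpec n d z m := by
      have h1 := hinv (i + 1) (by omega) (by omega)
      rw [h1, show ((n : Int) - 1 - (i + 1)).toNat = m from by omega]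
    have hstep : stepA n d z M i = M.set i.toNat (mvSpec n d z (m + 1)) := by
      show M.set i.toNat _ = _
      rw [hcamp, hnoc, mvSpec]
    rw [hstep]
    constructor
    · rw [List.length_set]; exact hlen
    · intro j hj1 hj2
      by_cases hji : j = i
      · rw [hji, pyGetD_set_self' _ _ _ hi0 hiL,
          show ((n : Int) - 1 - i).toNat = m + 1 from by omega]
      · rw [pyGetD_set_ne _ _ _ j (by omega) (by omega)]
        exact hinv j (by omega) hj2

-- ===== VERDICT (by name: the statement is the Claim_ definition above) =====
theorem max_votes_spec : Claim_equal_max_votes := by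
  intro n d z _ hpre
  obtain ⟨hn, hd, hz⟩ := hpre
  show max_votes n d z = max_votes_alt n d z
  -- B's side: the memoized recursion computes mvSpec at full depth
  have hm0 : MemoOK n d z ((PySem.Dict.empty).insert (n - 1) (PySem.List.pyGetD d (n - 1) 0)) := by
    intro j v hv
    rw [PySem.Dict.get?_insert] at hv
    split_ifs at hv with h
    · have : j = 0 := by omega
      cases hv; rw [this, mvSpec]
    · rw [PySem.Dict.get?_empty] at hv; cases hv
  have hB : max_votes_alt n d z = mvSpec n d z (n - 1).toNat :=
    (bRec_correct n d z (n - 1).toNat _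
      (memoOK_fold n d z (PySem.List.pyRange (n - 1) (-1) (-1)) _ hm0)).1
  -- A's side: the fold's cell 0 is mvSpec at full depth
  rw [max_votes_eq, PySem.List.pyRange_neg_one]
  have hrange : (n - 2 - (-1)).toNat = (n - 1).toNat := by omega
  rw [hrange]
  obtain ⟨_, hinv⟩ := foldA_inv n d z hn (n - 1).toNat (by omega)
  have hA := hinv 0 (by omega) (by omega)
  rw [hA, show ((n : Int) - 1 - 0).toNat = (n - 1).toNat from by omega, hB]
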